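-- pv_equiv track=rewrite | github.com/T-Santos/Daily-Coding-Problems | 1_DCP.py | interleave_reversed
-- ===== SOURCE A (Python) =====
-- def interleave_reversed(stack):
-- 	from collections import deque
-- 	queue = deque()
--
-- 	start = 0 if (len(stack)/2)%2==0 else 1
--
-- 	for locked_in in range(start,len(stack)):
--
-- 		# move all into stack up until locked in
-- 		for remove in range(0,(len(stack) - locked_in)):
-- 			queue.append(stack.pop())
--
-- 		# move them all back into the stack
-- 		for replace in range(0,len(queue)):
-- 			stack.append(queue.popleft())
--
-- 	return stack
-- ===== SOURCE B (Python) =====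
-- def interleave_reversed(stack):
-- 	# A's start-parity makes it interleave the REVERSED stack when len(stack)%4==0,
-- 	# otherwise the stack itself; compute that permutation directly in one two-pointer pass.
-- 	src = stack[::-1] if len(stack) % 4 == 0 else stack[:]
-- 	res = []
-- 	i, j = 0, len(src) - 1
-- 	while i < j:
-- 		res.append(src[i])
-- 		res.append(src[j])
-- 		i += 1
-- 		j -= 1
-- 	if i == j:
-- 		res.append(src[i])
-- 	stack[:] = res
-- 	return stack
-- ===== Notes on version B (the rewrite author's own statement) =====
-- stated objective: faster
-- what changed: Replaces the quadratic sequence of suffix reversals (repeated pop-all / push-all passes through a deque) by a single two-pointer pass that emits the net interleaving [t0, t_last, t1, t_last-1, ...] directly, where t is the reversed stack when len%4==0 (A's start parity) and the stack itself otherwise.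
import Mathlib
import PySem

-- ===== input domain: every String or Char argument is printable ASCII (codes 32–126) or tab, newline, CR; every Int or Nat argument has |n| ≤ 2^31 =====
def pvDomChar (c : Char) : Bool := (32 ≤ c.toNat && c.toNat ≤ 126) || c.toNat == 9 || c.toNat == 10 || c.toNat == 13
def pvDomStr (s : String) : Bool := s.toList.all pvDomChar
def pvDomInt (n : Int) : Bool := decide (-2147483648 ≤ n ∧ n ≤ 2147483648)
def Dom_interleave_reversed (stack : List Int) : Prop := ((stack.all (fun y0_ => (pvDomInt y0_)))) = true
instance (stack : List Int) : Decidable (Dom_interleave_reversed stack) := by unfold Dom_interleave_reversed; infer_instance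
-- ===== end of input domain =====

-- B computes A's net permutation in one two-pointer pass instead of A's quadratic sequence of
-- pop-all/push-all suffix reversals; both Pythons mutate `stack` in place and return it, so the
-- equivalence proved here is about the return value.

-- ===== PORT A =====
-- inner loop `for remove in …: queue.append(stack.pop())`: pop k times from the end of the stack
def pvPop : Nat → List Int → List Int → List Int × List Int
  | 0, s, q => (s, q)
  | k+1, s, q =>
    match PySem.List.pop? s (-1) with
    | none => (s, q)          -- IndexError in Python; never reached (k never exceeds the stack length)
    | some (x, rest) => pvPop k rest (q ++ [x])

-- inner loop `for replace in …: stack.append(queue.popleft())`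
def pvDrain : Nat → List Int → List Int → List Int × List Int
  | 0, s, q => (s, q)
  | k+1, s, q =>
    match q with
    | [] => (s, [])           -- popleft on an empty deque; never reached (k = len(queue))
    | x :: rest => pvDrain k (s ++ [x]) rest

-- one iteration of the outer `for locked_in in range(start, len(stack))` loop
def pvStep (n : Int) (st : List Int × List Int) (locked_in : Int) : List Int × List Int :=
  let p := pvPop (n - locked_in).toNat st.1 st.2
  pvDrain p.2.length p.1 p.2

-- start = 0 if (len(stack)/2)%2==0 else 1 : the float n/2 is an even integer iff 4 ∣ n (exact: lengths are < 2^53)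
def interleave_reversed (stack : List Int) : List Int :=
  ((PySem.List.pyRange (if (stack.length : Int) % 4 == 0 then 0 else 1) (stack.length : Int) 1).foldl
    (pvStep (stack.length : Int)) (stack, [])).1

-- ===== PORT B =====
-- the `while i < j` two-pointer loop of Source B, carrying the accumulator `res`;
-- `fuel` only bounds the iteration count so the recursion is structural (src.length iterations always suffice)
def pvTwo (fuel : Nat) (s : List Int) (i j : Int) (res : List Int) : List Int :=
  match fuel with
  | 0 => if i = j then res ++ [s.getD i.toNat 0] else res   -- loop exit; fuel never runs out while i < j
  | f+1 =>
    if i < j then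
      pvTwo f s (i+1) (j-1) (res ++ [s.getD i.toNat 0, s.getD j.toNat 0])
    else if i = j then res ++ [s.getD i.toNat 0]
    else res

-- src = stack[::-1] if len(stack) % 4 == 0 else stack[:]
def interleave_reversed_alt (stack : List Int) : List Int :=
  let src := if (stack.length : Int) % 4 == 0 then stack.reverse else stack
  pvTwo src.length src 0 ((src.length : Int) - 1) []

-- ===== PRECONDITION & SPEC =====
def Spec_interleave_reversed (stack : List Int) (out : List Int) : Prop := out = interleave_reversed_alt stack
instance (stack : List Int) (out : List Int) : Decidable (Spec_interleave_reversed stack out) := by unfold Spec_interleave_reversed; infer_instance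

-- ===== CLAIM (what is proved, stated in full; the proofs are below) =====
def Claim_equal_interleave_reversed : Prop := ∀ (stack : List Int), Dom_interleave_reversed stack → Spec_interleave_reversed stack (interleave_reversed stack)

-- ===== LEMMAS AND PROOFS =====

-- the interleaving both programs compute: f [] = [], f (a :: t) = a :: f t.reverse
def pvF : List Int → List Int
  | [] => []
  | a :: t => a :: pvF t.reverse
termination_by s => s.length
decreasing_by simp

-- reversal of the suffix of length k (what one outer iteration of A does to the stack)
def pvRevSuf (k : Nat) (s : List Int) : List Int :=
  s.take (s.length - k) ++ (s.drop (s.length - k)).reverse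

-- A's whole outer loop, abstracted: suffix reversals of lengths k, k-1, …, 1 in that order
def pvProc : Nat → List Int → List Int
  | 0, s => s
  | k+1, s => pvProc k (pvRevSuf (k+1) s)

theorem pvRevSuf_length (k : Nat) (s : List Int) : (pvRevSuf k s).length = s.length := by
  simp [pvRevSuf]

theorem pvPop_eq (k : Nat) : ∀ (s q : List Int), k ≤ s.length →
    pvPop k s q = (s.take (s.length - k), q ++ (s.drop (s.length - k)).reverse) := by
  induction k with
  | zero => intro s q _; simp [pvPop]
  | succ k ih =>
    intro s q hk
    rcases List.eq_nil_or_concat s with rfl | ⟨w, x, rfl⟩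
    · simp at hk
    · simp only [List.concat_eq_append] at hk ⊢
      rw [pvPop, PySem.List.pop?_last]
      have hwk : k ≤ w.length := by simp at hk; omega
      show pvPop k w (q ++ [x]) = _
      rw [ih w (q ++ [x]) hwk]
      have h1 : (w ++ [x]).length - (k+1) = w.length - k := by simp
      rw [h1]
      simp only [Prod.mk.injEq]
      constructor
      · rw [List.take_append_of_le_length (by omega)]
      · rw [List.drop_append_of_le_length (by omega)]
        simp

theorem pvDrain_eq (q : List Int) : ∀ s : List Int, pvDrain q.length s q = (s ++ q, []) := by
  induction q with
  | nil => intro s; simp [pvDrain]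
  | cons x rest ih => intro s; simp [pvDrain, ih (s ++ [x])]

theorem pvStep_eq (s : List Int) (l : Int) (h0 : 0 ≤ l) (h1 : l < (s.length : Int)) :
    pvStep (s.length : Int) (s, []) l = (pvRevSuf ((s.length : Int) - l).toNat s, []) := by
  unfold pvStep
  dsimp only
  rw [pvPop_eq _ s [] (by omega)]
  dsimp only
  simp only [List.nil_append]
  rw [pvDrain_eq]
  rfl

theorem pvBridge (k : Nat) : ∀ (s : List Int), k ≤ s.length →
    (PySem.List.pyRange ((s.length : Int) - k) (s.length : Int) 1).foldl
      (pvStep (s.length : Int)) (s, []) = (pvProc k s, []) := by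
  induction k with
  | zero =>
    intro s _
    rw [PySem.List.pyRange_one_eq_nil (by omega)]
    rfl
  | succ k ih =>
    intro s hk
    have hc : ((s.length : Int) - ((k : Nat) + 1 : Nat)) = (s.length : Int) - k - 1 := by
      push_cast; ring
    rw [hc, PySem.List.pyRange_one_cons (by omega), List.foldl_cons]
    rw [pvStep_eq s ((s.length : Int) - (k : Int) - 1) (by omega) (by omega)]
    have hkk : ((s.length : Int) - ((s.length : Int) - (k : Int) - 1)).toNat = k + 1 := by omega
    rw [hkk]
    have hlen : (pvRevSuf (k+1) s).length = s.length := pvRevSuf_length _ _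
    have hih := ih (pvRevSuf (k+1) s) (by rw [hlen]; omega)
    rw [hlen] at hih
    have harg : (s.length : Int) - (k : Int) - 1 + 1 = (s.length : Int) - (k : Int) := by ring
    rw [harg, hih]
    rfl

theorem pvProc_cons (k : Nat) : ∀ (a : Int) (u : List Int), k ≤ u.length →
    pvProc k (a :: u) = a :: pvProc k u := by
  induction k with
  | zero => intros; rfl
  | succ k ih =>
    intro a u hk
    have hsuf : pvRevSuf (k+1) (a :: u) = a :: pvRevSuf (k+1) u := by
      unfold pvRevSuf
      have h1 : (a :: u).length - (k+1) = (u.length - (k+1)) + 1 := by simp; omega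
      rw [h1, List.take_succ_cons, List.drop_succ_cons]
      rfl
    calc pvProc (k+1) (a :: u) = pvProc k (pvRevSuf (k+1) (a :: u)) := rfl
      _ = pvProc k (a :: pvRevSuf (k+1) u) := by rw [hsuf]
      _ = a :: pvProc k (pvRevSuf (k+1) u) := ih a _ (by rw [pvRevSuf_length]; omega)
      _ = a :: pvProc (k+1) u := rfl

theorem pvProc_interleave : ∀ (n : Nat) (s : List Int), s.length = n →
    pvProc (s.length - 1) s = pvF s := by
  intro n
  induction n using Nat.strong_induction_on with
  | _ n ih =>
    intro s hn
    match s with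
    | [] => simp [pvProc, pvF]
    | [a] => simp [pvProc, pvF]
    | a :: b :: t =>
      have hlen : (a :: b :: t).length - 1 = t.length + 1 := by simp
      rw [hlen]
      have hsuf : pvRevSuf (t.length + 1) (a :: b :: t) = a :: (b :: t).reverse := by
        unfold pvRevSuf
        have h1 : (a :: b :: t).length - (t.length + 1) = 1 := by simp
        rw [h1]
        rfl
      have hrl : (b :: t).reverse.length = t.length + 1 := by simp
      have hihr := ih (t.length + 1) (by subst hn; simp) (b :: t).reverse hrl
      rw [hrl] at hihr
      simp only [Nat.add_sub_cancel] at hihr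
      calc pvProc (t.length + 1) (a :: b :: t)
          = pvProc t.length (pvRevSuf (t.length + 1) (a :: b :: t)) := rfl
        _ = pvProc t.length (a :: (b :: t).reverse) := by rw [hsuf]
        _ = a :: pvProc t.length (b :: t).reverse := pvProc_cons _ a _ (by simp)
        _ = a :: pvF (b :: t).reverse := by rw [hihr]
        _ = pvF (a :: b :: t) := by rw [pvF]

theorem pvProc_full (s : List Int) : pvProc s.length s = pvF s.reverse := by
  match s with
  | [] => simp [pvProc, pvF]
  | a :: t =>
    have hsuf : pvRevSuf (a :: t).length (a :: t) = (a :: t).reverse := by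
      unfold pvRevSuf
      simp
    have h : (a :: t).length = t.length + 1 := by simp
    have hint := pvProc_interleave (a :: t).reverse.length (a :: t).reverse rfl
    calc pvProc (a :: t).length (a :: t)
        = pvProc t.length (pvRevSuf (t.length + 1) (a :: t)) := by rw [h]; rfl
      _ = pvProc t.length (a :: t).reverse := by rw [h] at hsuf; rw [hsuf]
      _ = pvF (a :: t).reverse := by simpa using hint

-- A computes pvF of the stack (ordinary lengths) or of its reverse (lengths ≡ 0 mod 4)
theorem pvA_eq (s : List Int) :
    interleave_reversed s = if s.length % 4 = 0 then pvF s.reverse else pvF s := by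
  unfold interleave_reversed
  by_cases h4 : s.length % 4 = 0
  · have hc : ((s.length : Int) % 4 == 0) = true := by simp only [beq_iff_eq]; omega
    have hstart : (if ((s.length : Int) % 4 == 0) = true then (0 : Int) else 1) = 0 := by
      rw [hc]; rfl
    rw [hstart, if_pos h4]
    have hb := pvBridge s.length s (le_refl _)
    have harg : (s.length : Int) - (s.length : Nat) = 0 := by omega
    rw [harg] at hb
    rw [hb, pvProc_full]
  · have hc : ((s.length : Int) % 4 == 0) = false := by
      simp only [beq_eq_false_iff_ne, ne_eq]; omega
    have hstart : (if ((s.length : Int) % 4 == 0) = true then (0 : Int) else 1) = 1 := by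
      rw [hc]; rfl
    rw [hstart, if_neg h4]
    have hb := pvBridge (s.length - 1) s (by omega)
    have harg : (s.length : Int) - ((s.length - 1 : Nat) : Int) = 1 := by omega
    rw [harg] at hb
    rw [hb, pvProc_interleave s.length s rfl]

-- ===== B side =====

theorem pvF_cons_append (x y : Int) (w : List Int) :
    pvF (x :: (w ++ [y])) = x :: y :: pvF w := by
  rw [pvF, List.reverse_append]
  simp only [List.reverse_cons, List.reverse_nil, List.nil_append, List.singleton_append]
  rw [pvF, List.reverse_reverse]

-- the segment s[i..j] that pvTwo still has to interleave
def pvSeg (s : List Int) (i j : Int) : List Int :=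
  (s.drop i.toNat).take (j + 1 - i).toNat

theorem pvTwo_eq : ∀ (fuel : Nat) (s : List Int) (i j : Int) (res : List Int),
    (j + 1 - i).toNat ≤ 2 * fuel + 1 → 0 ≤ i → j < (s.length : Int) →
    pvTwo fuel s i j res = res ++ pvF (pvSeg s i j) := by
  intro fuel
  induction fuel with
  | zero =>
    intro s i j res hf h0 hj
    rw [pvTwo]
    by_cases heq : i = j
    · simp only [heq, if_true]
      have hseg : pvSeg s j j = [s.getD j.toNat 0] := by
        unfold pvSeg
        have hn : (j + 1 - j).toNat = 1 := by omega
        rw [hn, List.take_one, List.head?_drop]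
        rw [List.getElem?_eq_getElem (by omega : j.toNat < s.length)]
        rw [List.getD_eq_getElem _ _ (by omega)]
        rfl
      rw [hseg]
      simp [pvF]
    · simp only [heq, if_false]
      have hij : j < i := by omega
      have hseg : pvSeg s i j = [] := by
        unfold pvSeg
        have : (j + 1 - i).toNat = 0 := by omega
        rw [this]
        simp
      rw [hseg]
      simp [pvF]
  | succ f ih =>
    intro s i j res hf h0 hj
    rw [pvTwo]
    by_cases hij : i < j
    · simp only [hij, if_true]
      rw [ih s (i+1) (j-1) _ (by omega) (by omega) (by omega)]
      have hit : (i + 1).toNat = i.toNat + 1 := by omega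
      have hi : i.toNat < s.length := by omega
      have hseg : pvSeg s i j = s.getD i.toNat 0 :: (pvSeg s (i+1) (j-1) ++ [s.getD j.toNat 0]) := by
        unfold pvSeg
        rw [hit, List.drop_eq_getElem_cons hi]
        have hn : (j + 1 - i).toNat = (((j - 1) + 1 - (i + 1)).toNat + 1) + 1 := by omega
        rw [hn, List.take_succ_cons, List.take_add_one]
        have hidx : (s.drop (i.toNat + 1))[((j - 1) + 1 - (i + 1)).toNat]? = some (s.getD j.toNat 0) := by
          rw [List.getElem?_drop]
          have hj' : i.toNat + 1 + ((j - 1) + 1 - (i + 1)).toNat = j.toNat := by omega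
          rw [hj', List.getElem?_eq_getElem (by omega : j.toNat < s.length)]
          rw [List.getD_eq_getElem _ _ (by omega)]
        rw [hidx, List.getD_eq_getElem _ _ hi]
        rfl
      rw [hseg, pvF_cons_append]
      simp
    · simp only [hij, if_false]
      by_cases heq : i = j
      · simp only [heq, if_true]
        have hseg : pvSeg s j j = [s.getD j.toNat 0] := by
          unfold pvSeg
          have hn : (j + 1 - j).toNat = 1 := by omega
          rw [hn, List.take_one, List.head?_drop]
          rw [List.getElem?_eq_getElem (by omega : j.toNat < s.length)]
          rw [List.getD_eq_getElem _ _ (by omega)]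
          rfl
        rw [hseg]
        simp [pvF]
      · have hseg : pvSeg s i j = [] := by
          unfold pvSeg
          have : (j + 1 - i).toNat = 0 := by omega
          rw [this]
          simp
        simp only [heq, if_false]
        rw [hseg]
        simp [pvF]

-- Source B's whole while-loop on any source list computes pvF of it
theorem pvRun_eq (src : List Int) :
    pvTwo src.length src 0 ((src.length : Int) - 1) [] = pvF src := by
  rw [pvTwo_eq src.length src 0 ((src.length : Int) - 1) [] (by omega) (le_refl 0) (by omega)]
  have hseg : pvSeg src 0 ((src.length : Int) - 1) = src := by
    unfold pvSeg
    simp only [Int.toNat_zero, List.drop_zero]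
    have : ((src.length : Int) - 1 + 1 - 0).toNat = src.length := by omega
    rw [this, List.take_length]
  rw [hseg, List.nil_append]

theorem pvB_eq (s : List Int) :
    interleave_reversed_alt s = if s.length % 4 = 0 then pvF s.reverse else pvF s := by
  unfold interleave_reversed_alt
  by_cases h4 : s.length % 4 = 0
  · have hc : ((s.length : Int) % 4 == 0) = true := by simp only [beq_iff_eq]; omega
    simp only [hc, if_true, if_pos h4]
    rw [show s.reverse.length = s.length from by simp] at *
    exact (by simpa using pvRun_eq s.reverse)
  · have hc : ((s.length : Int) % 4 == 0) = false := by
      simp only [beq_eq_false_iff_ne, ne_eq]; omega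
    simp only [hc, if_neg h4]
    exact pvRun_eq s

-- ===== VERDICT (by name: the statement is the Claim_ definition above) =====
theorem interleave_reversed_spec : Claim_equal_interleave_reversed := by
  intro stack _
  unfold Spec_interleave_reversed
  rw [pvA_eq, pvB_eq]
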